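-- pv_equiv track=rewrite | github.com/ztaylor2/sr-problems | problems.py | glue
-- ===== SOURCE A (Python) =====
-- def glue(values, glues):
--     """
--     >>> glue([1,2,3,4,5,6,7,8,9], [0,0,0,0,0,0,0,0,0])
--     [1, 2, 3, 4, 5, 6, 7, 8, 9]
--     >>> glue([1,2,3,4,5,6,7,8,9], [1,0,0,0,0,0,0,0,0])
--     [12, 3, 4, 5, 6, 7, 8, 9]
--     >>> glue([1,2,3,4,5,6,7,8,9], [0,1,0,0,0,0,0,0,0])
--     [1, 23, 4, 5, 6, 7, 8, 9]
--     >>> glue([1,2,3,4,5,6,7,8,9], [0,1,1,1,1,1,1,1,1])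
--     [1, 23456789]
--     """
--
--     index_j = 0
--     index_i = 0
--     size = len(values)
--
--     result = []
--     value_stack = values[0]
--
--     while index_i < size:
--
--         # the case over the boundary
--         if index_i + 1 >= size:
--             result.append(value_stack)
--             break
--
--         new_value = values[index_i + 1]
--         # normal case
--         if glues[index_j] == 0:
--             result.append(value_stack)
--             value_stack = new_value
--         else:
--             value_stack = value_stack * 10 + new_value
--
--         index_i += 1
--         index_j += 1
--
--     return result
-- ===== SOURCE B (Python) =====
-- def glue(values, glues):
--     # Two-pass: first group the values into sublists according to the glue
--     # flags, then fold each group into a number.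
--     groups = []
--     current = [values[0]]
--     for flag, v in zip(glues, values[1:]):
--         if flag:
--             current.append(v)
--         else:
--             groups.append(current)
--             current = [v]
--     groups.append(current)
--     out = []
--     for g in groups:
--         n = 0
--         for d in g:
--             n = n * 10 + d
--         out.append(n)
--     return out
-- ===== Notes on version B (the rewrite author's own statement) =====
-- stated objective: alternative
-- what changed: Replaces A's index-driven while loop with a single running accumulator by a two-pass group-then-fold: first partition values into sublists via zip over the glue flags, then fold each group into its number.
import Mathlib
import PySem

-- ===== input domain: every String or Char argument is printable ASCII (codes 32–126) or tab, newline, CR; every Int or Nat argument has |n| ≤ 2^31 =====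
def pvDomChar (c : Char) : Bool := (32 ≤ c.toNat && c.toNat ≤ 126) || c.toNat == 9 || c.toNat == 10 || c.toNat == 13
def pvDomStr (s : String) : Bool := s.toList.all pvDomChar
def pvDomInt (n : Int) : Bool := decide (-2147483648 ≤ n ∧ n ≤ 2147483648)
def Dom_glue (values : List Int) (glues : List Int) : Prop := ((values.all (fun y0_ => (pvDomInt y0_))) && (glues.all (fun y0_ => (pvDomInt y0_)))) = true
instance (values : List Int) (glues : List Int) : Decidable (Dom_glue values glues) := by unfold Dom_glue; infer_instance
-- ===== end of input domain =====

-- B replaces A's single index-driven accumulator loop by a two-pass group-then-fold;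
-- the equivalence below is about the return value on Pre_glue (where A returns normally).

-- ===== PORT A =====
-- literal transliteration of A's while loop; pyGetD's default 0 is only reached
-- outside Pre_glue (where the Python raises IndexError)
def glueLoopA (values : List Int) (glues : List Int) (size : Nat) (i j : Nat)
    (stack : Int) (result : List Int) : List Int :=
  if i < size then
    if i + 1 ≥ size then result ++ [stack]
    else
      let newValue := PySem.List.pyGetD values ((i : Int) + 1) 0
      if PySem.List.pyGetD glues (j : Int) 0 = 0 then
        glueLoopA values glues size (i+1) (j+1) newValue (result ++ [stack])
      else
        glueLoopA values glues size (i+1) (j+1) (stack * 10 + newValue) result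
  else result
termination_by size - i

def glue (values : List Int) (glues : List Int) : List Int :=
  glueLoopA values glues values.length 0 0 (PySem.List.pyGetD values 0 0) []

-- ===== PORT B =====
-- grouping pass: fold over zip(glues, values[1:]) keeping the current group and finished groups
def glueAltBuild : List (Int × Int) → List Int → List (List Int) → List (List Int)
  | [], current, groups => groups ++ [current]
  | (flag, v) :: rest, current, groups =>
    if flag ≠ 0 then glueAltBuild rest (current ++ [v]) groups
    else glueAltBuild rest [v] (groups ++ [current])

-- numeric pass: n = 0; for d in g: n = n*10 + d
def glueDigits (g : List Int) : Int := g.foldl (fun n d => n * 10 + d) 0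

def glue_alt (values : List Int) (glues : List Int) : List Int :=
  match values with
  | [] => []   -- the Python B raises here (values[0]); outside Pre_glue
  | v0 :: vrest =>
    (glueAltBuild (glues.zip vrest) [v0] []).map glueDigits

-- ===== PRECONDITION & SPEC =====
-- Pre_glue holds exactly where the Python A returns normally: values nonempty and
-- glues long enough for the loop's glues[index_j] accesses (trivially true when len(values)=1).
def Pre_glue (values : List Int) (glues : List Int) : Prop :=
  values ≠ [] ∧ values.length ≤ glues.length + 1
instance (values : List Int) (glues : List Int) : Decidable (Pre_glue values glues) := by
  unfold Pre_glue; infer_instance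

def pvWitness_glue : List Int × List Int := ([1, 2, 3], [1, 0])

def Spec_glue (values : List Int) (glues : List Int) (out : List Int) : Prop := out = glue_alt values glues
instance (values : List Int) (glues : List Int) (out : List Int) : Decidable (Spec_glue values glues out) := by unfold Spec_glue; infer_instance

-- ===== CLAIM (what is proved, stated in full; the proofs are below) =====
def Claim_equal_glue : Prop := ∀ (values : List Int) (glues : List Int), Dom_glue values glues → Pre_glue values glues → Spec_glue values glues (glue values glues)

-- ===== LEMMAS AND PROOFS =====

-- proof-only common recursive characterisation of the merge
def core : List Int → List Int → Int → List Int
  | [], _, stack => [stack]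
  | _ :: _, [], _ => []          -- unreachable inside Pre_glue
  | v :: vs, g :: gs, stack =>
    if g = 0 then stack :: core vs gs v else core vs gs (stack * 10 + v)

theorem glueDigits_append (c : List Int) (v : Int) :
    glueDigits (c ++ [v]) = glueDigits c * 10 + v := by
  simp [glueDigits, List.foldl_append]

theorem build_eq_core : ∀ (vrest glues : List Int) (current : List Int) (groups : List (List Int)),
    vrest.length ≤ glues.length →
    (glueAltBuild (glues.zip vrest) current groups).map glueDigits
      = groups.map glueDigits ++ core vrest glues (glueDigits current) := by
  intro vrest
  induction vrest with
  | nil => intro glues current groups _; simp [glueAltBuild, core]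
  | cons v vs ih =>
    intro glues current groups hlen
    cases glues with
    | nil => simp at hlen
    | cons g gs =>
      simp only [List.zip_cons_cons, glueAltBuild]
      by_cases hg : g = 0
      · simp only [hg, if_neg (by simp : ¬ (0 : Int) ≠ 0), core]
        rw [ih gs [v] (groups ++ [current]) (by simpa using hlen)]
        simp [glueDigits]
      · simp only [if_pos hg, core, if_neg hg]
        rw [ih gs (current ++ [v]) groups (by simpa using hlen)]
        rw [glueDigits_append]

theorem loopA_eq_core (values glues : List Int) :
    ∀ (k i : Nat) (stack : Int) (result : List Int),
    values.length - i = k → i < values.length → values.length ≤ glues.length + 1 →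
    glueLoopA values glues values.length i i stack result
      = result ++ core (values.drop (i+1)) (glues.drop i) stack := by
  intro k
  induction k with
  | zero => intro i stack result hk hi _; omega
  | succ k ih =>
    intro i stack result hk hi hlen
    rw [glueLoopA, if_pos hi]
    by_cases hb : i + 1 ≥ values.length
    · rw [if_pos hb]
      have : values.drop (i+1) = [] := List.drop_eq_nil_of_le hb
      simp [this, core]
    · rw [if_neg hb]
      have hi1 : i + 1 < values.length := by omega
      have hig : i < glues.length := by omega
      have hv : PySem.List.pyGetD values ((i : Int) + 1) 0 = values[i+1] := by
        have := PySem.List.pyGetD_natCast (xs := values) (n := i+1) (d := (0:Int))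
        simpa [List.getD_eq_getElem?_getD, hi1] using this
      have hg : PySem.List.pyGetD glues (i : Int) 0 = glues[i] := by
        have := PySem.List.pyGetD_natCast (xs := glues) (n := i) (d := (0:Int))
        simpa [List.getD_eq_getElem?_getD, hig] using this
      have hdropv : values.drop (i+1) = values[i+1] :: values.drop (i+2) := by
        rw [List.drop_eq_getElem_cons hi1]
      have hdropg : glues.drop i = glues[i] :: glues.drop (i+1) := by
        rw [List.drop_eq_getElem_cons hig]
      rw [hv, hg]
      by_cases h0 : glues[i] = (0:Int)
      · rw [if_pos h0, ih (i+1) values[i+1] (result ++ [stack]) (by omega) hi1 hlen]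
        rw [hdropv, hdropg, core, if_pos h0]
        simp
      · rw [if_neg h0, ih (i+1) (stack * 10 + values[i+1]) result (by omega) hi1 hlen]
        rw [hdropv, hdropg, core, if_neg h0]

-- ===== VERDICT (by name: the statement is the Claim_ definition above) =====
theorem glue_spec : Claim_equal_glue := by
  intro values glues _ hpre
  obtain ⟨hne, hlen⟩ := hpre
  unfold Spec_glue glue
  cases values with
  | nil => exact absurd rfl hne
  | cons v0 vrest =>
    have hlen' : vrest.length ≤ glues.length := by simpa using hlen
    rw [loopA_eq_core (v0 :: vrest) glues (v0 :: vrest).length 0 (PySem.List.pyGetD (v0 :: vrest) 0 0) []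
        rfl (by simp) (by simpa using hlen)]
    show _ = glue_alt (v0 :: vrest) glues
    simp only [glue_alt]
    rw [build_eq_core vrest glues [v0] [] hlen']
    simp [PySem.List.pyGetD, PySem.List.pyGet?, PySem.List.pyIdx?, glueDigits]
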